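-- pv_equiv track=rewrite | github.com/SauravSinha76/scaler | class16/mod_array.py | solve
-- ===== SOURCE A (Python) =====
-- def solve(A,B):
--     ans =0
--     t =1
--     n = len(A)
--     for i in range(n-1,-1,-1):
--         ans = (A[i]*t + ans) % B
--         t = (t * 10) % B
--     return ans
-- ===== SOURCE B (Python) =====
-- def solve(A, B):
--     ans = 0
--     for d in A:
--         ans = (ans * 10 + d) % B
--     return ans
-- ===== Notes on version B (the rewrite author's own statement) =====
-- stated objective: idiomatic
-- what changed: Forward Horner pass (ans = (ans*10 + d) % B over A left-to-right) replaces A's reverse indexed loop that maintains a separate power-of-ten accumulator t; one modular reduction per digit instead of two and no indexing.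
import Mathlib
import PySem

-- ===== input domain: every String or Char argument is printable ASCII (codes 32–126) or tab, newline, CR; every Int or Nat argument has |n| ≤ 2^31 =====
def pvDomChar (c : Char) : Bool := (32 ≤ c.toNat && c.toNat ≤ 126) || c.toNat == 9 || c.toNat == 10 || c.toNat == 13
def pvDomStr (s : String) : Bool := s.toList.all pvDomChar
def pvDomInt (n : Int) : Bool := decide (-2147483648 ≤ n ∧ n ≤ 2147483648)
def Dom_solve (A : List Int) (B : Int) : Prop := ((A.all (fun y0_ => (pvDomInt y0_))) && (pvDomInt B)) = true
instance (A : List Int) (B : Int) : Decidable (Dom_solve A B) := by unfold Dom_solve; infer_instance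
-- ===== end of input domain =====

-- B re-implements the digit-array-mod-B computation as a forward Horner pass (idiomatic; no power-of-ten accumulator).
-- ===== PORT A =====
def solve (A : List Int) (B : Int) : Int :=
  let n : Int := (A.length : Int)
  ((PySem.List.pyRange (n - 1) (-1) (-1)).foldl
    (fun (s : Int × Int) i =>
      (PySem.Int.mod (PySem.List.pyGetD A i 0 * s.2 + s.1) B,
       PySem.Int.mod (s.2 * 10) B))
    (0, 1)).1

-- ===== PORT B =====
def solve_alt (A : List Int) (B : Int) : Int :=
  A.foldl (fun ans d => PySem.Int.mod (ans * 10 + d) B) 0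

-- ===== PRECONDITION & SPEC =====
-- Pre_ excludes exactly the inputs where Python A raises ZeroDivisionError: B = 0 with a nonempty A
-- (with A = [] the loop body never runs and no division happens).
def Pre_solve (A : List Int) (B : Int) : Prop := A = [] ∨ B ≠ 0
instance (A : List Int) (B : Int) : Decidable (Pre_solve A B) := by unfold Pre_solve; infer_instance
def pvWitness_solve : List Int × Int := ([1, 2, 3], 7)

def Spec_solve (A : List Int) (B : Int) (out : Int) : Prop := out = solve_alt A B
instance (A : List Int) (B : Int) (out : Int) : Decidable (Spec_solve A B out) := by unfold Spec_solve; infer_instance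

-- ===== CLAIM (what is proved, stated in full; the proofs are below) =====
def Claim_equal_solve : Prop := ∀ (A : List Int) (B : Int), Dom_solve A B → Pre_solve A B → Spec_solve A B (solve A B)

-- ===== LEMMAS AND PROOFS =====

-- B ∣ a - mod a B (the representative differs from a by a multiple of B)
theorem dvd_sub_mod (a B : Int) : B ∣ (a - PySem.Int.mod a B) := by
  refine ⟨PySem.Int.floordiv a B, ?_⟩
  have h := PySem.Int.floordiv_mul_add_mod a B
  linarith

-- floor mod depends only on the residue class
theorem mod_congr {B : Int} (hb : B ≠ 0) {x y : Int} (h : B ∣ (x - y)) :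
    PySem.Int.mod x B = PySem.Int.mod y B := by
  have hx := PySem.Int.floordiv_mul_add_mod x B
  have hy := PySem.Int.floordiv_mul_add_mod y B
  have hd : B ∣ (PySem.Int.mod x B - PySem.Int.mod y B) := by
    obtain ⟨k, hk⟩ := h
    exact ⟨k - PySem.Int.floordiv x B + PySem.Int.floordiv y B, by linarith⟩
  have hz : PySem.Int.mod x B - PySem.Int.mod y B = 0 := by
    rcases lt_or_gt_of_ne hb with hneg | hpos
    · have b1 := PySem.Int.mod_neg_bounds x hneg
      have b2 := PySem.Int.mod_neg_bounds y hneg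
      have hd' : -B ∣ (PySem.Int.mod x B - PySem.Int.mod y B) := (neg_dvd).mpr hd
      exact Int.eq_zero_of_abs_lt_dvd hd' (by rw [abs_lt]; omega)
    · have b1 := PySem.Int.mod_nonneg x hpos
      have b2 := PySem.Int.mod_nonneg y hpos
      have c1 := PySem.Int.mod_lt x hpos
      have c2 := PySem.Int.mod_lt y hpos
      exact Int.eq_zero_of_abs_lt_dvd hd (by rw [abs_lt]; omega)
  omega

theorem mod_zero_left (B : Int) : PySem.Int.mod 0 B = 0 :=
  (PySem.Int.mod_eq_zero_iff_dvd 0 B).mpr (dvd_zero B)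

-- value of the digit list as a number (plain Horner, no mod)
def num (l : List Int) : Int := l.foldl (fun a d => a * 10 + d) 0

-- B-side loop: Horner with reduction each step computes num mod B
theorem alt_loop {B : Int} (hb : B ≠ 0) (l : List Int) (x : Int) :
    l.foldl (fun ans d => PySem.Int.mod (ans * 10 + d) B) (PySem.Int.mod x B)
      = PySem.Int.mod (l.foldl (fun a d => a * 10 + d) x) B := by
  induction l generalizing x with
  | nil => simp
  | cons d t ih =>
    simp only [List.foldl_cons]
    rw [show PySem.Int.mod (PySem.Int.mod x B * 10 + d) B = PySem.Int.mod (x * 10 + d) B from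
      mod_congr hb ⟨-(PySem.Int.floordiv x B) * 10, by
        have h := PySem.Int.floordiv_mul_add_mod x B; ring_nf; linarith⟩]
    exact ih (x * 10 + d)

-- A-side loop invariant, by reverse structural induction on the list
theorem a_loop {B : Int} (hb : B ≠ 0) (l : List Int) :
    l ≠ [] → ∀ (ans t : Int),
    (((PySem.List.pyRange ((l.length : Int) - 1) (-1) (-1)).foldl
      (fun (s : Int × Int) i =>
        (PySem.Int.mod (PySem.List.pyGetD l i 0 * s.2 + s.1) B,
         PySem.Int.mod (s.2 * 10) B))
      (ans, t)).1) = PySem.Int.mod (num l * t + ans) B := by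
  induction l using List.reverseRecOn with
  | nil => intro h; exact absurd rfl h
  | append_singleton xs d ih =>
    intro _ ans t
    have hlen : (((xs ++ [d]).length : Int)) - 1 = (xs.length : Int) := by
      simp
    rw [hlen, PySem.List.pyRange_neg_one_cons (by omega : (-1 : Int) < (xs.length : Int)),
        List.foldl_cons]
    have hget : PySem.List.pyGetD (xs ++ [d]) ((xs.length : Int)) 0 = d := by
      simp [PySem.List.pyGetD, PySem.List.pyGet?, PySem.List.pyIdx?]
    rw [hget]
    have hswap : (PySem.List.pyRange ((xs.length : Int) - 1) (-1) (-1)).foldl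
        (fun (s : Int × Int) i =>
          (PySem.Int.mod (PySem.List.pyGetD (xs ++ [d]) i 0 * s.2 + s.1) B,
           PySem.Int.mod (s.2 * 10) B))
        (PySem.Int.mod (d * t + ans) B, PySem.Int.mod (t * 10) B)
      = (PySem.List.pyRange ((xs.length : Int) - 1) (-1) (-1)).foldl
        (fun (s : Int × Int) i =>
          (PySem.Int.mod (PySem.List.pyGetD xs i 0 * s.2 + s.1) B,
           PySem.Int.mod (s.2 * 10) B))
        (PySem.Int.mod (d * t + ans) B, PySem.Int.mod (t * 10) B) := by
      apply PySem.List.foldl_congr_mem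
      intro acc i hi
      rw [PySem.List.mem_pyRange_neg_one] at hi
      have : PySem.List.pyGetD (xs ++ [d]) i 0 = PySem.List.pyGetD xs i 0 := by
        rw [PySem.List.pyGetD_eq_getElem _ _ (by omega) (by simp; omega),
            PySem.List.pyGetD_eq_getElem _ _ (by omega) (by omega)]
        exact List.getElem_append_left (by omega)
      rw [this]
    rw [hswap]
    rcases eq_or_ne xs [] with hx | hx
    · subst hx
      simp only [List.length_nil, Nat.cast_zero, zero_sub,
        PySem.List.pyRange_neg_one_eq_nil (le_refl (-1 : Int)), List.foldl_nil]
      simp [num]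
    · rw [ih hx (PySem.Int.mod (d * t + ans) B) (PySem.Int.mod (t * 10) B)]
      have hnum : num (xs ++ [d]) = num xs * 10 + d := by
        simp [num, List.foldl_append]
      rw [hnum]
      apply mod_congr hb
      have h1 := dvd_sub_mod (t * 10) B
      have h2 := dvd_sub_mod (d * t + ans) B
      have e : (num xs * PySem.Int.mod (t * 10) B + PySem.Int.mod (d * t + ans) B)
          - ((num xs * 10 + d) * t + ans)
          = -(num xs * ((t * 10) - PySem.Int.mod (t * 10) B))
            - ((d * t + ans) - PySem.Int.mod (d * t + ans) B) := by ring
      rw [e]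
      exact dvd_sub (dvd_neg.mpr (Dvd.dvd.mul_left h1 _)) h2

-- ===== VERDICT (by name: the statement is the Claim_ definition above) =====
theorem solve_spec : Claim_equal_solve := by
  intro A B _ hpre
  unfold Spec_solve solve solve_alt
  rcases hpre with h | hb
  · subst h; rfl
  · cases A with
    | nil => simp [PySem.List.pyRange_neg_one_eq_nil (by norm_num : (-1 : Int) ≤ -1)]
    | cons d t =>
      rw [a_loop hb (d :: t) (by simp) 0 1]
      rw [show num (d :: t) * 1 + 0 = (d :: t).foldl (fun a d => a * 10 + d) 0 from by
        simp [num]]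
      rw [← alt_loop hb (d :: t) 0, mod_zero_left]
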